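-- pv_equiv track=rewrite | github.com/thirunirai-sierra/auto_remediation_logic_app | logic_app_remediator/api/services/workflow_service.py | find_manual_or_recurrence_trigger
-- ===== SOURCE A (Python) =====
-- from typing import Any, Dict, List, Optional
--
-- def find_manual_or_recurrence_trigger(definition: Dict[str, Any]) -> Optional[str]:
--     triggers = definition.get("triggers") or {}
--     for name, trig in triggers.items():
--         if not isinstance(trig, dict):
--             continue
--         ttype = (trig.get("type") or "").lower()
--         if ttype in ("request", "manual"):
--             return name
--     for name, trig in triggers.items():
--         if isinstance(trig, dict) and (trig.get("type") or "").lower() == "recurrence":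
--             return name
--     if triggers:
--         return next(iter(triggers.keys()), None)
--     return None
-- ===== SOURCE B (Python) =====
-- def find_manual_or_recurrence_trigger(definition):
--     triggers = definition.get("triggers") or {}
--     first_key = None
--     first_recurrence = None
--     for name, trig in triggers.items():
--         if first_key is None:
--             first_key = name
--         if not isinstance(trig, dict):
--             continue
--         ttype = (trig.get("type") or "").lower()
--         if ttype in ("request", "manual"):
--             return name
--         if first_recurrence is None and ttype == "recurrence":
--             first_recurrence = name
--     return first_recurrence if first_recurrence is not None else first_key
-- ===== Notes on version B (the rewrite author's own statement) =====
-- stated objective: simpler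
-- what changed: Replaced A's three separate passes over triggers (request/manual scan, recurrence scan, first-key fallback) by a single loop that early-returns on request/manual while recording the first recurrence name and the first key.
import Mathlib
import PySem

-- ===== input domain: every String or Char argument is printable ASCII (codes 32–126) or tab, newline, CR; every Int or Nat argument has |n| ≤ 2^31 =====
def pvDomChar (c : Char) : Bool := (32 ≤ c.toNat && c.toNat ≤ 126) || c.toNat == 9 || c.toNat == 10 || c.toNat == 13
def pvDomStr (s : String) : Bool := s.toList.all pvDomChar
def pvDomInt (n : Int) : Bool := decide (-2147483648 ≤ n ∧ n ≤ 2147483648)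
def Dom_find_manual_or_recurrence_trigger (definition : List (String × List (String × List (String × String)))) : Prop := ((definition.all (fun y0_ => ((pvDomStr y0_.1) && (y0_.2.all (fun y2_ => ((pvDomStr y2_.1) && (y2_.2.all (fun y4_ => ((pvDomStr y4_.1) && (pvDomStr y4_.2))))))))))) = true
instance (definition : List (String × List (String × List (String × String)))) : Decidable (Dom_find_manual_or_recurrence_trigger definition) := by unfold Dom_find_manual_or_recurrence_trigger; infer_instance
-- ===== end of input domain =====

-- One honest line: B folds A's three scans over triggers (request/manual, then recurrence,
-- then first key) into a single loop with two accumulators; objective: simpler (one pass).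
-- In the typed encoding every trigger value is a dict, so A's `isinstance(trig, dict)` guard
-- is always true and has no branch in the port.

-- ===== PORT A =====
-- shared dict semantics: (trig.get("type") or "").lower()  ("" is the falsy default either way)
def pvTType (trig : List (String × String)) : String :=
  PySem.Str.lower ((PySem.Dict.ofList trig).getD "type" "")

-- first loop of A: return name on the first trigger whose type is request/manual
def pvLoop1 : List (String × List (String × String)) → Option String
  | [] => none
  | (name, trig) :: rest =>
      if pvTType trig = "request" ∨ pvTType trig = "manual" then some name else pvLoop1 rest

-- second loop of A: first trigger whose type is recurrence
def pvLoop2 : List (String × List (String × String)) → Option String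
  | [] => none
  | (name, trig) :: rest =>
      if pvTType trig = "recurrence" then some name else pvLoop2 rest

def find_manual_or_recurrence_trigger (definition : List (String × List (String × List (String × String)))) : Option String :=
  let triggers := (PySem.Dict.ofList definition).getD "triggers" []   -- definition.get("triggers") or {}
  let items := (PySem.Dict.ofList triggers).items
  match pvLoop1 items with
  | some n => some n
  | none =>
    match pvLoop2 items with
    | some n => some n
    | none => if items.isEmpty then none else items.head?.map Prod.fst  -- if triggers: next(iter(keys), None)

-- ===== PORT B =====
-- B's single loop: firstKey / firstRec accumulators, early return on request/manual
def pvScan : List (String × List (String × String)) → Option String → Option String → Option String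
  | [], _firstKey, firstRec =>
      match firstRec with
      | some r => some r
      | none => _firstKey
  | (name, trig) :: rest, firstKey, firstRec =>
      let firstKey := match firstKey with | none => some name | some k => some k
      let t := pvTType trig
      if t = "request" ∨ t = "manual" then some name
      else pvScan rest firstKey
        (match firstRec with
         | none => if t = "recurrence" then some name else none
         | some r => some r)

def find_manual_or_recurrence_trigger_alt (definition : List (String × List (String × List (String × String)))) : Option String :=
  let triggers := (PySem.Dict.ofList definition).getD "triggers" []
  pvScan (PySem.Dict.ofList triggers).items none none

-- ===== PRECONDITION & SPEC =====
def Spec_find_manual_or_recurrence_trigger (definition : List (String × List (String × List (String × String)))) (out : Option String) : Prop := out = find_manual_or_recurrence_trigger_alt definition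
instance (definition : List (String × List (String × List (String × String)))) (out : Option String) : Decidable (Spec_find_manual_or_recurrence_trigger definition out) := by unfold Spec_find_manual_or_recurrence_trigger; infer_instance

-- ===== CLAIM (what is proved, stated in full; the proofs are below) =====
def Claim_equal_find_manual_or_recurrence_trigger : Prop := ∀ (definition : List (String × List (String × List (String × String)))), Dom_find_manual_or_recurrence_trigger definition → Spec_find_manual_or_recurrence_trigger definition (find_manual_or_recurrence_trigger definition)

-- ===== LEMMAS AND PROOFS =====

-- ===== VERDICT (by name: the statement is the Claim_ definition above) =====
-- key lemma: the single scan, with accumulators fk/fr, equals A's three-pass cascade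
theorem pvScan_eq (ts : List (String × List (String × String))) :
    ∀ fk fr : Option String,
      pvScan ts fk fr =
        ((pvLoop1 ts).orElse fun _ =>
          (fr.orElse fun _ =>
            ((pvLoop2 ts).orElse fun _ =>
              (fk.orElse fun _ => ts.head?.map Prod.fst)))) := by
  induction ts with
  | nil =>
      intro fk fr
      cases fr <;> cases fk <;> simp [pvScan, pvLoop1, pvLoop2]
  | cons p rest ih =>
      intro fk fr
      obtain ⟨name, trig⟩ := p
      by_cases h1 : pvTType trig = "request" ∨ pvTType trig = "manual"
      · simp [pvScan, pvLoop1, h1]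
      · by_cases h2 : pvTType trig = "recurrence"
        · cases fr <;> cases fk <;>
            simp [pvScan, pvLoop1, pvLoop2, h2, ih, Option.orElse]
        · cases fr <;> cases fk <;>
            simp [pvScan, pvLoop1, pvLoop2, h1, h2, ih, Option.orElse]

-- A's three-pass cascade equals B's single scan started with empty accumulators
theorem pvCascade_eq (ts : List (String × List (String × String))) :
    (match pvLoop1 ts with
     | some n => some n
     | none =>
       match pvLoop2 ts with
       | some n => some n
       | none => if ts.isEmpty then none else ts.head?.map Prod.fst) = pvScan ts none none := by
  rw [pvScan_eq]
  cases h1 : pvLoop1 ts with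
  | some n => simp [Option.orElse]
  | none =>
    cases h2 : pvLoop2 ts with
    | some n => simp [Option.orElse]
    | none =>
      cases ts with
      | nil => simp [Option.orElse]
      | cons p rest => simp [Option.orElse, List.head?]

theorem find_manual_or_recurrence_trigger_spec : Claim_equal_find_manual_or_recurrence_trigger := by
  intro definition _
  unfold Spec_find_manual_or_recurrence_trigger
  unfold find_manual_or_recurrence_trigger find_manual_or_recurrence_trigger_alt
  exact pvCascade_eq _
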